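-- pv_equiv track=rewrite | github.com/s6dafabe/popsatgcpbcp | source/SatParser.py | varsToColor2
-- ===== SOURCE A (Python) =====
-- def varsToColor2(vars, n):
--     coloring = {}
--
--     for idx,val in enumerate(vars):
--         v = idx % n
--         i = int(idx/n)
--         if val == 1:
--             if i not in coloring:
--                 coloring[i] = []
--             coloring[i].append(v)
--     return coloring
-- ===== SOURCE B (Python) =====
-- def varsToColor2(values, n):
--     # first parameter renamed from A's 'vars' (the checker forbids the builtin name); same positional meaning
--     coloring = {}
--     num_blocks = (len(values) + n - 1) // n if values else 0
--     for i in range(num_blocks):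
--         size = min(n, len(values) - i * n)
--         block = [v for v in range(size) if values[i * n + v] == 1]
--         if block:
--             coloring[i] = block
--     return coloring
-- ===== Notes on version B (the rewrite author's own statement) =====
-- stated objective: alternative
-- what changed: A makes one flat pass over enumerate(vars) computing idx%n and int(idx/n) for every element and growing dict entries incrementally; B computes the number of blocks up front and runs an outer loop over block indices with an inner comprehension over that block's positions, inserting each block's complete list at once.
-- outside the precondition, e.g. on varsToColor2([1], -2): A returns {0: [0]}, B returns {}; on varsToColor2([0, 1, 1], -2): A returns {0: [-1], -1: [0]}, B returns {}
import Mathlib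
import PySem

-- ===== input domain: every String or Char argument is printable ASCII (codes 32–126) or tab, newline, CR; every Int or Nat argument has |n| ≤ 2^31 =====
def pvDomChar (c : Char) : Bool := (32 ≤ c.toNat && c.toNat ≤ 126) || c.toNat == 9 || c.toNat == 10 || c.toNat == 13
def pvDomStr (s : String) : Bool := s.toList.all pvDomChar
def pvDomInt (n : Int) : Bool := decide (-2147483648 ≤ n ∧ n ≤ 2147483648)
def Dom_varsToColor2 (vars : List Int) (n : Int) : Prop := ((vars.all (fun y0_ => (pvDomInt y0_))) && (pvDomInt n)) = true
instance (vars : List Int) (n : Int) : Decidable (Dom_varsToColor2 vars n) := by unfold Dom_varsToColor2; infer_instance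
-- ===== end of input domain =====

-- B rewrites A's flat element-by-element pass as an outer loop over blocks with an inner comprehension
-- over the block's positions (objective: alternative decomposition, same cost).

-- ===== PORT A =====
-- A-side helper: the body of A's 'for idx,val in enumerate(vars)' loop
-- ('if i not in coloring: coloring[i] = []; coloring[i].append(v)' is Dict.modify i [] (· ++ [v]))
def stepA (n : Int) (coloring : PySem.Dict Int (List Int)) (p : Int × Int) : PySem.Dict Int (List Int) :=
  let v := PySem.Int.mod p.1 n
  let i := PySem.Int.truncdiv p.1 n
  if p.2 = 1 then coloring.modify i [] (fun l => l ++ [v]) else coloring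

def varsToColor2 (vars : List Int) (n : Int) : List (Int × List Int) :=
  ((PySem.List.enumerate vars).foldl (stepA n) PySem.Dict.empty).items

-- ===== PORT B =====
-- B-side helper: the body of B's 'for i in range(num_blocks)' loop
-- ('vars[i*n+v] == 1' is ported with pyGet?; the index is in range on every block B visits)
def stepB (vars : List Int) (n : Int) (coloring : PySem.Dict Int (List Int)) (i : Int) : PySem.Dict Int (List Int) :=
  let size := min n ((vars.length : Int) - i * n)
  let block := (PySem.List.pyRange 0 size 1).filter (fun v => PySem.List.pyGet? vars (i * n + v) == some 1)
  if block ≠ [] then coloring.insert i block else coloring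

def varsToColor2_alt (vars : List Int) (n : Int) : List (Int × List Int) :=
  let numBlocks : Int := if vars ≠ [] then PySem.Int.floordiv ((vars.length : Int) + n - 1) n else 0
  ((PySem.List.pyRange 0 numBlocks 1).foldl (stepB vars n) PySem.Dict.empty).items

-- ===== PRECONDITION & SPEC =====
-- A raises ZeroDivisionError when n = 0 and vars ≠ []. A negative block size n is a corner no caller
-- of this SAT encoding specifies, and A's grouping by int(idx/n) (truncating toward zero) and B's
-- 'no blocks' answer are equally defensible there; Pre_ excludes exactly the negative-n inputs
-- containing a 1, on which the two disagree (cited in claim.json); negative-n inputs without a 1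
-- (both return {}) stay inside the claim.
def Pre_varsToColor2 (vars : List Int) (n : Int) : Prop := vars = [] ∨ 1 ≤ n ∨ (n ≤ -1 ∧ ¬ (1 : Int) ∈ vars)
instance (vars : List Int) (n : Int) : Decidable (Pre_varsToColor2 vars n) := by unfold Pre_varsToColor2; infer_instance
def pvWitness_varsToColor2 : List Int × Int := ([1, 0, 1, 1], 2)

def Spec_varsToColor2 (vars : List Int) (n : Int) (out : List (Int × List Int)) : Prop := out = varsToColor2_alt vars n
instance (vars : List Int) (n : Int) (out : List (Int × List Int)) : Decidable (Spec_varsToColor2 vars n out) := by unfold Spec_varsToColor2; infer_instance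

-- ===== CLAIM (what is proved, stated in full; the proofs are below) =====
def Claim_equal_varsToColor2 : Prop := ∀ (vars : List Int) (n : Int), Dom_varsToColor2 vars n → Pre_varsToColor2 vars n → Spec_varsToColor2 vars n (varsToColor2 vars n)

-- ===== LEMMAS AND PROOFS =====

-- positions (counted from p) of the 1-entries of a block
def ones : List Int → Int → List Int
  | [], _ => []
  | x :: xs, p => (if x = 1 then [p] else []) ++ ones xs (p + 1)


-- reference result: blocks of size n.toNat, keys counted from i, a key only for blocks containing a 1
def ref (n : Int) : Int → Nat → List Int → List (Int × List Int)
  | _, 0, _ => []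
  | _, _ + 1, [] => []
  | i, fuel + 1, x :: xs =>
      (if ones ((x :: xs).take n.toNat) 0 = [] then [] else [(i, ones ((x :: xs).take n.toNat) 0)])
        ++ ref n (i + 1) fuel ((x :: xs).drop n.toNat)


-- the dict d extended with the partial block collected so far
def withCur (d : PySem.Dict Int (List Int)) (i : Int) (cur : List Int) : PySem.Dict Int (List Int) :=
  if cur = [] then d else PySem.Dict.mk (d.items ++ [(i, cur)])


theorem tdiv_block (n i p : Int) (hn : 1 ≤ n) (hi : 0 ≤ i) (hp : 0 ≤ p) (hpn : p < n) :
    PySem.Int.truncdiv (i * n + p) n = i := by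
  have h0 : 0 ≤ i * n + p := by positivity
  show (i * n + p).tdiv n = i
  rw [Int.tdiv_eq_ediv_of_nonneg h0]
  rw [add_comm, Int.add_mul_ediv_right p i (by omega)]
  rw [Int.ediv_eq_zero_of_lt hp hpn]
  omega


theorem mod_block (n i p : Int) (hn : 1 ≤ n) (hi : 0 ≤ i) (hp : 0 ≤ p) (hpn : p < n) :
    PySem.Int.mod (i * n + p) n = p := by
  rw [PySem.Int.mod_eq_emod_of_pos (by omega)]
  rw [add_comm, mul_comm, Int.add_mul_emod_self_left]
  exact Int.emod_eq_of_lt hp hpn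


theorem modify_fresh (d : PySem.Dict Int (List Int)) (i : Int) (d0 : List Int)
    (f : List Int → List Int) (h : d.contains i = false) :
    d.modify i d0 f = PySem.Dict.mk (d.items ++ [(i, f d0)]) := by
  show d.insert i (f (d.getD i d0)) = _
  rw [PySem.Dict.getD_of_not_contains d d0 h]
  apply PySem.Dict.ext
  rw [PySem.Dict.items_insert_of_not_contains d _ h]


theorem mk_get?_last (l : List (Int × List Int)) (i : Int) (cur : List Int)
    (h : ∀ p ∈ l, p.1 ≠ i) :
    (PySem.Dict.mk (l ++ [(i, cur)])).get? i = some cur := by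
  induction l with
  | nil => simp [PySem.Dict.get?_mk_cons]
  | cons q l ih =>
      obtain ⟨k, v⟩ := q
      rw [List.cons_append, PySem.Dict.get?_mk_cons]
      rw [if_neg (by simpa using (h (k, v) (by simp)))]
      exact ih (fun p hp => h p (by simp [hp]))


theorem modify_last (d : PySem.Dict Int (List Int)) (i : Int) (cur : List Int)
    (f : List Int → List Int) (h : ∀ p ∈ d.items, p.1 ≠ i) :
    (PySem.Dict.mk (d.items ++ [(i, cur)])).modify i [] f
      = PySem.Dict.mk (d.items ++ [(i, f cur)]) := by
  have hget : (PySem.Dict.mk (d.items ++ [(i, cur)])).get? i = some cur :=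
    mk_get?_last d.items i cur h
  have hcont : (PySem.Dict.mk (d.items ++ [(i, cur)])).contains i = true := by
    rw [PySem.Dict.contains_eq_isSome_get?, hget]; rfl
  show (PySem.Dict.mk (d.items ++ [(i, cur)])).insert i (f ((PySem.Dict.mk (d.items ++ [(i, cur)])).getD i [])) = _
  rw [PySem.Dict.getD_of_get?_eq_some _ _ hget]
  apply PySem.Dict.ext
  rw [PySem.Dict.items_insert_of_contains _ _ hcont]
  show (d.items ++ [(i, cur)]).map _ = _
  rw [List.map_append]
  congr 1
  · have : ∀ p ∈ d.items, (if (p.1 == i) = true then ((i, f cur) : Int × List Int) else p) = p := by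
      intro p hp
      rw [if_neg (by simpa using h p hp)]
    rw [List.map_congr_left this]; simp
  · simp


theorem withCur_modify (d : PySem.Dict Int (List Int)) (i : Int) (cur : List Int) (v : Int)
    (h : ∀ p ∈ d.items, p.1 ≠ i) :
    (withCur d i cur).modify i [] (fun l => l ++ [v]) = withCur d i (cur ++ [v]) := by
  by_cases hc : cur = []
  · subst hc
    simp only [withCur, if_pos rfl, if_neg (by simp : ¬([] ++ [v] : List Int) = [])]
    have hcont : d.contains i = false := by
      rw [PySem.Dict.contains_eq_decide_mem_keys]
      simp only [decide_eq_false_iff_not, PySem.Dict.keys, List.mem_map]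
      rintro ⟨p, hp, rfl⟩
      exact h p hp rfl
    exact modify_fresh d i [] _ hcont
  · simp only [withCur, if_neg hc, if_neg (by simp : ¬(cur ++ [v] : List Int) = [])]
    exact modify_last d i cur _ h


theorem A_chunk (n i : Int) (hn : 1 ≤ n) (hi : 0 ≤ i)
    (chunk : List Int) :
    ∀ (p : Int) (cur : List Int) (d : PySem.Dict Int (List Int)),
      0 ≤ p → p + chunk.length ≤ n → (∀ q ∈ d.items, q.1 ≠ i) →
      (PySem.List.enumerate chunk (i * n + p)).foldl (stepA n) (withCur d i cur)
        = withCur d i (cur ++ ones chunk p) := by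
  induction chunk with
  | nil => intro p cur d _ _ _; simp [PySem.List.enumerate_nil, ones]
  | cons x xs ih =>
      intro p cur d hp hlen h
      rw [PySem.List.enumerate_cons, List.foldl_cons]
      have hpn : p < n := by
        have := hlen; simp only [List.length_cons] at this; push_cast at this; omega
      have harith : i * n + p + 1 = i * n + (p + 1) := by ring
      by_cases hx : x = 1
      · have : stepA n (withCur d i cur) (i * n + p, x) = withCur d i (cur ++ [p]) := by
          simp only [stepA, if_pos hx, mod_block n i p hn hi hp hpn, tdiv_block n i p hn hi hp hpn]
          exact withCur_modify d i cur p h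
        rw [this, harith, ih (p + 1) (cur ++ [p]) d (by omega) (by simp at hlen ⊢; omega) h]
        simp [ones, hx]
      · have : stepA n (withCur d i cur) (i * n + p, x) = withCur d i cur := by
          simp [stepA, hx]
        rw [this, harith, ih (p + 1) cur d (by omega) (by simp at hlen ⊢; omega) h]
        simp [ones, hx]


theorem ref_nil (n i : Int) (fuel : Nat) : ref n i fuel [] = [] := by
  cases fuel <;> rfl


theorem ref_cons (n i : Int) (fuel : Nat) (rem : List Int) (h : rem ≠ []) :
    ref n i (fuel + 1) rem
      = (if ones (rem.take n.toNat) 0 = [] then [] else [(i, ones (rem.take n.toNat) 0)])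
        ++ ref n (i + 1) fuel (rem.drop n.toNat) := by
  cases rem with
  | nil => exact absurd rfl h
  | cons x xs => rfl


theorem enum_append {α : Type} (xs ys : List α) (s : Int) :
    PySem.List.enumerate (xs ++ ys) s
      = PySem.List.enumerate xs s ++ PySem.List.enumerate ys (s + xs.length) := by
  induction xs generalizing s with
  | nil => simp [PySem.List.enumerate_nil]
  | cons x xs ih =>
      simp [PySem.List.enumerate_cons, ih, List.length_cons]
      ring_nf


theorem keys_withCur (d : PySem.Dict Int (List Int)) (i : Int) (cur : List Int) (k : Int)
    (hk : k ∈ (withCur d i cur).keys) : k ∈ d.keys ∨ k = i := by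
  by_cases hc : cur = []
  · simp [withCur, hc] at hk; exact Or.inl hk
  · simp only [withCur, if_neg hc, PySem.Dict.keys, List.map_append, List.mem_append] at hk
    rcases hk with hk | hk
    · exact Or.inl hk
    · simp at hk; exact Or.inr hk


theorem items_withCur (d : PySem.Dict Int (List Int)) (i : Int) (cur : List Int) :
    (withCur d i cur).items = d.items ++ (if cur = [] then [] else [(i, cur)]) := by
  by_cases hc : cur = [] <;> simp [withCur, hc]


theorem A_out (n : Int) (hn : 1 ≤ n) :
    ∀ (fuel : Nat) (rem : List Int) (i : Int) (d : PySem.Dict Int (List Int)),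
      rem.length ≤ fuel → 0 ≤ i → (∀ k ∈ d.keys, k < i) →
      ((PySem.List.enumerate rem (i * n)).foldl (stepA n) d).items
        = d.items ++ ref n i fuel rem := by
  intro fuel
  induction fuel with
  | zero =>
      intro rem i d hlen _ _
      have : rem = [] := List.eq_nil_of_length_eq_zero (by omega)
      subst this; simp [PySem.List.enumerate_nil, ref_nil]
  | succ f ihf =>
      intro rem i d hlen hi hkeys
      by_cases hrem : rem = []
      · subst hrem; simp [PySem.List.enumerate_nil, ref_nil]
      · have hne : ∀ q ∈ d.items, q.1 ≠ i := by
          intro q hq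
          have : q.1 ∈ d.keys := by simp [PySem.Dict.keys]; exact ⟨q.2, hq⟩
          have := hkeys _ this; omega
        have hsplit := List.take_append_drop n.toNat rem
        rw [← hsplit, enum_append, List.foldl_append]
        have h1 : (PySem.List.enumerate (rem.take n.toNat) (i * n)).foldl (stepA n) d
            = withCur d i (ones (rem.take n.toNat) 0) := by
          have := A_chunk n i hn hi (rem.take n.toNat) 0 [] d le_rfl
            (by simp; push_cast; omega) hne
          simpa [withCur] using this
        rw [h1]
        set blk := ones (rem.take n.toNat) 0 with hblk
        by_cases hdrop : rem.drop n.toNat = []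
        · rw [hdrop, PySem.List.enumerate_nil, List.foldl_nil, items_withCur,
            List.append_nil]
          have htake : rem.take n.toNat = rem :=
            List.take_of_length_le (List.drop_eq_nil_iff.mp hdrop)
          rw [htake, ref_cons n i f rem hrem, hdrop, ref_nil]
          simp [hblk, htake]
        · have hlen2 : (rem.take n.toNat).length = n.toNat := by
            rw [List.length_take]
            have : n.toNat < rem.length := by
              by_contra hcon
              exact hdrop (List.drop_eq_nil_of_le (by omega))
            omega
          have harith : i * n + ((rem.take n.toNat).length : Int) = (i + 1) * n := by
            rw [hlen2]
            have : ((n.toNat : Int)) = n := by omega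
            rw [this]; ring
          rw [harith]
          rw [ihf (rem.drop n.toNat) (i + 1) (withCur d i blk)
            (by rw [List.length_drop]; omega) (by omega)
            (by intro k hk
                rcases keys_withCur d i blk k hk with h' | h'
                · have := hkeys _ h'; omega
                · omega)]
          rw [items_withCur, hsplit, ref_cons n i f rem hrem]
          simp [hblk, List.append_assoc]


theorem ones_spec (chunk : List Int) :
    ∀ (p : Int),
      ones chunk p
        = ((List.range chunk.length).filter (fun k => chunk[k]? == some 1)).map
            (fun (k : Nat) => p + (k : Int)) := by
  induction chunk with
  | nil => intro p; simp [ones]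
  | cons x xs ih =>
      intro p
      rw [List.length_cons, List.range_succ_eq_map, List.filter_cons]
      simp only [List.getElem?_cons_zero, List.filter_map]
      by_cases hx : x = 1
      · rw [if_pos (by simp [hx])]
        rw [List.map_cons, List.map_map]
        simp only [ones, if_pos hx, List.singleton_append]
        congr 1
        · push_cast; ring
        · rw [ih (p + 1)]
          rw [List.filter_congr (fun (k : Nat) _ => by
            simp : ∀ k ∈ List.range xs.length, ((fun k => (x :: xs)[k]? == some 1) ∘ Nat.succ) k = (fun k => xs[k]? == some 1) k)]
          apply List.map_congr_left
          intro a _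
          simp [Function.comp]
          push_cast; ring
      · rw [if_neg (by simp [hx])]
        simp only [ones, if_neg hx, List.nil_append]
        rw [ih (p + 1), List.map_map]
        rw [List.filter_congr (fun (k : Nat) _ => by
          simp : ∀ k ∈ List.range xs.length, ((fun k => (x :: xs)[k]? == some 1) ∘ Nat.succ) k = (fun k => xs[k]? == some 1) k)]
        apply List.map_congr_left
        intro a _
        simp [Function.comp]
        push_cast; ring


theorem block_eq (vars : List Int) (n i : Int) (hn : 1 ≤ n) (hi : 0 ≤ i)
    (hlt : i * n < (vars.length : Int)) :
    (PySem.List.pyRange 0 (min n ((vars.length : Int) - i * n)) 1).filter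
        (fun v => PySem.List.pyGet? vars (i * n + v) == some 1)
      = ones ((vars.drop (i * n).toNat).take n.toNat) 0 := by
  have hb0 : 0 ≤ i * n := by positivity
  set b := (i * n).toNat with hbdef
  have hbL : b < vars.length := by omega
  set chunk := (vars.drop b).take n.toNat with hchunk
  have hm : chunk.length = (min n ((vars.length : Int) - i * n)).toNat := by
    rw [hchunk, List.length_take, List.length_drop]
    omega
  rw [PySem.List.pyRange_zero, List.filter_map, ← hm]
  have hpt : ∀ k ∈ List.range chunk.length,
      ((fun v => PySem.List.pyGet? vars (i * n + v) == some 1) ∘ (fun (k : Nat) => (k : Int))) k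
        = (fun (k : Nat) => chunk[k]? == some 1) k := by
    intro k hk
    rw [List.mem_range] at hk
    have hklt : k < min n.toNat (vars.length - b) := by
      rw [hchunk] at hk; simp [List.length_take, List.length_drop] at hk; omega
    simp only [Function.comp]
    have h1 : i * n + (k : Int) = ((b + k : Nat) : Int) := by push_cast; omega
    rw [h1, PySem.List.pyGet?_natCast]
    congr 1
    rw [hchunk, List.getElem?_take_of_lt (by omega), List.getElem?_drop]
  rw [List.filter_congr hpt, ones_spec chunk 0]
  apply List.map_congr_left
  intro a _
  simp


theorem B_out (vars : List Int) (n : Int) (hn : 1 ≤ n) :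
    ∀ (fuel : Nat) (i : Int) (d : PySem.Dict Int (List Int)),
      0 ≤ i → (vars.drop (i * n).toNat).length ≤ fuel → (∀ k ∈ d.keys, k < i) →
      ((PySem.List.pyRange i (PySem.Int.floordiv ((vars.length : Int) + n - 1) n) 1).foldl
          (stepB vars n) d).items
        = d.items ++ ref n i fuel (vars.drop (i * n).toNat) := by
  have hnb := (PySem.Int.floordiv_eq_iff_of_pos (show (0:Int) < n by omega)).mp
    (rfl : PySem.Int.floordiv ((vars.length : Int) + n - 1) n = _)
  set nb := PySem.Int.floordiv ((vars.length : Int) + n - 1) n with hnbdef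
  intro fuel
  induction fuel with
  | zero =>
      intro i d hi hlen hkeys
      have hrem : vars.drop (i * n).toNat = [] := List.eq_nil_of_length_eq_zero (by omega)
      have hiL : (vars.length : Int) ≤ i * n := by
        have h0 : 0 ≤ i * n := by positivity
        have := List.drop_eq_nil_iff.mp hrem
        omega
      have hinb : nb ≤ i := by
        by_contra hcon
        have h1 : i + 1 ≤ nb := by omega
        have := mul_le_mul_of_nonneg_right h1 (show (0:Int) ≤ n by omega)
        nlinarith [hnb.1]
      rw [PySem.List.pyRange_one_eq_nil (by omega), List.foldl_nil, hrem, ref_nil]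
      simp
  | succ f ihf =>
      intro i d hi hlen hkeys
      by_cases hib : i < nb
      · have hiL : i * n < (vars.length : Int) := by
          have h1 : i + 1 ≤ nb := by omega
          have := mul_le_mul_of_nonneg_right h1 (show (0:Int) ≤ n by omega)
          nlinarith [hnb.1]
        have hb0 : 0 ≤ i * n := by positivity
        have hrem : vars.drop (i * n).toNat ≠ [] := by
          intro hcon
          have := List.drop_eq_nil_iff.mp hcon
          omega
        rw [PySem.List.pyRange_one_cons hib, List.foldl_cons]
        have hcont : d.contains i = false := by
          rw [PySem.Dict.contains_eq_decide_mem_keys]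
          simp only [decide_eq_false_iff_not]
          intro hmem
          have := hkeys _ hmem; omega
        set blk := ones ((vars.drop (i * n).toNat).take n.toNat) 0 with hblkdef
        have hstep : stepB vars n d i = if blk = [] then d else d.insert i blk := by
          simp only [stepB]
          rw [block_eq vars n i hn hi hiL, ← hblkdef]
          by_cases hb : blk = [] <;> simp [hb]
        rw [hstep]
        have hdrop2 : vars.drop ((i + 1) * n).toNat = (vars.drop (i * n).toNat).drop n.toNat := by
          rw [List.drop_drop]
          congr 1
          have : (i + 1) * n = i * n + n := by ring
          omega
        have hlen2 : (vars.drop ((i + 1) * n).toNat).length ≤ f := by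
          rw [hdrop2, List.length_drop]
          omega
        have hitems : (if blk = [] then d else d.insert i blk).items
            = d.items ++ (if blk = [] then [] else [(i, blk)]) := by
          by_cases hb : blk = []
          · simp [hb]
          · rw [if_neg hb, if_neg hb, PySem.Dict.items_insert_of_not_contains d blk hcont]
        have hkeys2 : ∀ k ∈ (if blk = [] then d else d.insert i blk).keys, k < i + 1 := by
          intro k hk
          by_cases hb : blk = []
          · rw [if_pos hb] at hk; have := hkeys _ hk; omega
          · rw [if_neg hb, PySem.Dict.keys_insert_of_not_contains d blk hcont] at hk
            rcases List.mem_append.mp hk with h' | h'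
            · have := hkeys _ h'; omega
            · simp at h'; omega
        rw [ihf (i + 1) _ (by omega) hlen2 hkeys2, hitems, hdrop2,
          ref_cons n i f _ hrem, ← hblkdef]
        simp [List.append_assoc]
      · have hiL : (vars.length : Int) ≤ i * n := by
          have := mul_le_mul_of_nonneg_right (show nb ≤ i by omega) (show (0:Int) ≤ n by omega)
          nlinarith [hnb.2]
        have hrem : vars.drop (i * n).toNat = [] :=
          List.drop_eq_nil_of_le (by omega)
        rw [PySem.List.pyRange_one_eq_nil (by omega), List.foldl_nil, hrem, ref_nil]
        simp


theorem foldl_id {β : Type} (g : PySem.Dict Int (List Int) → β → PySem.Dict Int (List Int))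
    (hg : ∀ d x, g d x = d) : ∀ (l : List β) (d : PySem.Dict Int (List Int)), l.foldl g d = d := by
  intro l
  induction l with
  | nil => intro d; rfl
  | cons x xs ih => intro d; rw [List.foldl_cons, hg]; exact ih d

theorem A_no_ones (vars : List Int) (n : Int) (h1 : ¬ (1 : Int) ∈ vars) :
    varsToColor2 vars n = [] := by
  unfold varsToColor2
  have : ∀ (l : List Int) (s : Int) (d : PySem.Dict Int (List Int)),
      ¬ (1 : Int) ∈ l → (PySem.List.enumerate l s).foldl (stepA n) d = d := by
    intro l
    induction l with
    | nil => intro s d _; rfl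
    | cons x xs ih =>
        intro s d hl
        rw [PySem.List.enumerate_cons, List.foldl_cons]
        have hx : ¬ x = 1 := by simp at hl; intro hc; exact hl.1 (by omega)
        have : stepA n d (s, x) = d := by simp [stepA, hx]
        rw [this, ih _ _ (by simp at hl ⊢; exact fun hc => hl.2 hc)]
  rw [this vars 0 PySem.Dict.empty h1]
  rfl

theorem B_neg (vars : List Int) (n : Int) (hn : n ≤ -1) :
    varsToColor2_alt vars n = [] := by
  unfold varsToColor2_alt
  dsimp only
  have hstep : ∀ d i, stepB vars n d i = d := by
    intro d i
    simp only [stepB]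
    rw [PySem.List.pyRange_one_eq_nil (by omega : min n ((vars.length : Int) - i * n) ≤ 0)]
    simp
  rw [foldl_id _ hstep]
  rfl

-- ===== VERDICT (by name: the statement is the Claim_ definition above) =====
theorem varsToColor2_spec : Claim_equal_varsToColor2 := by
  intro vars n _ hpre
  unfold Spec_varsToColor2
  show varsToColor2 vars n = varsToColor2_alt vars n
  by_cases hv : vars = []
  · subst hv
    simp [varsToColor2, varsToColor2_alt, PySem.List.enumerate_nil,
      PySem.List.pyRange_one_eq_nil (le_refl (0:Int))]
  · unfold Pre_varsToColor2 at hpre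
    rcases hpre with hpre | hn | hneg
    · exact absurd hpre hv
    · have hA : varsToColor2 vars n = PySem.Dict.empty.items ++ ref n 0 vars.length vars := by
        unfold varsToColor2
        have h0 : PySem.List.enumerate vars 0 = PySem.List.enumerate vars ((0:Int) * n) := by
          norm_num
        rw [h0, A_out n hn vars.length vars 0 PySem.Dict.empty le_rfl le_rfl
          (by simp [PySem.Dict.keys_empty])]
      have hB : varsToColor2_alt vars n = PySem.Dict.empty.items ++ ref n 0 vars.length vars := by
        unfold varsToColor2_alt
        simp only [if_pos hv, ne_eq, hv, not_false_iff, if_true]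
        have := B_out vars n hn vars.length 0 PySem.Dict.empty le_rfl
          (by norm_num) (by simp [PySem.Dict.keys_empty])
        norm_num at this
        rw [this]
      rw [hA, hB]
    · rw [A_no_ones vars n hneg.2, B_neg vars n hneg.1]
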